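-- pv_equiv track=rewrite | github.com/aidenmomtaz/PhenoRare | modified_phrank.py | get_all_ancestors
-- ===== SOURCE A (Python) =====
-- def get_all_ancestors(hpo_term, child_to_parent_map,freq):
--     ancestors = {}
--     term = hpo_term
--     parents = child_to_parent_map.get(term, [])[:]
--     while parents:
--         parent = parents.pop()
--         ancestors[parent] = freq
--         parents = parents + child_to_parent_map.get(parent, [])
--     return ancestors
-- ===== SOURCE B (Python) =====
-- def get_all_ancestors(hpo_term, child_to_parent_map, freq):
--     # Depth-first traversal that expands every term at most once: membership in
--     # `ancestors` doubles as the visited set, and an explicit stack of frames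
--     # (one list of still-unprocessed parents per expanded node) is the work state.
--     ancestors = {}
--     frames = [list(reversed(child_to_parent_map.get(hpo_term, [])))]
--     while frames:
--         top = frames[0]
--         if not top:
--             frames.pop(0)
--             continue
--         p = top.pop(0)
--         if p not in ancestors:
--             ancestors[p] = freq
--             frames.insert(0, list(reversed(child_to_parent_map.get(p, []))))
--     return ancestors
-- ===== Notes on version B (the rewrite author's own statement) =====
-- stated objective: alternative
-- what changed: B replaces A's flat work list (which re-appends and re-expands every duplicate entry) by a depth-first traversal with an explicit stack of per-node frames in which the ancestors dict doubles as a visited set, so each term is expanded at most once.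
import Mathlib
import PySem

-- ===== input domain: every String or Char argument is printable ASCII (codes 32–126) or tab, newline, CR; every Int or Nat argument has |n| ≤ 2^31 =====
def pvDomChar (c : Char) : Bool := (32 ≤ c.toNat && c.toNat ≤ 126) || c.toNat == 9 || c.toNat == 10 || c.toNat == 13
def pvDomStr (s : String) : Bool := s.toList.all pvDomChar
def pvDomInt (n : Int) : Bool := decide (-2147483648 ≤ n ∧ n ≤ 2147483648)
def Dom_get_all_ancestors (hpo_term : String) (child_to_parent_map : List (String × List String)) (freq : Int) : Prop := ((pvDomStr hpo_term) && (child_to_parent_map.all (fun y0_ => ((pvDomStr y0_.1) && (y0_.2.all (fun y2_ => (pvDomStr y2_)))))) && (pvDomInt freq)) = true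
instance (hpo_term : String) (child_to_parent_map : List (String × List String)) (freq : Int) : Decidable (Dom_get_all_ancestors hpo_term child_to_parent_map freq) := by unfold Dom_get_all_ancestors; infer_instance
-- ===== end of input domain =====

-- B replaces A's flat work list (which re-appends and re-expands every duplicate entry) by a
-- depth-first traversal with an explicit stack of per-node frames in which the ancestors dict
-- doubles as a visited set, so each term is expanded at most once; same returned dict wherever
-- A terminates.

-- ===== PORT A =====
-- child_to_parent_map.get(x, [])
def pvParents (m : List (String × List String)) (x : String) : List String :=
  (PySem.Dict.mk m).getD x []

-- fuel for the while-loops (A terminates within this bound on every input admitted by Pre_;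
-- the loops stop by themselves when the work list empties)
def pvN (hpo_term : String) (m : List (String × List String)) : Nat :=
  (pvParents m hpo_term).length + m.length + (m.map (fun kv => kv.2.length)).sum

def pvFuel (hpo_term : String) (m : List (String × List String)) : Nat :=
  (pvN hpo_term m + 2) ^ (pvN hpo_term m + 2)

-- while parents: parent = parents.pop(); ancestors[parent] = freq; parents = parents + get(parent, [])
def pvLoopA (m : List (String × List String)) (freq : Int) :
    Nat → List String → PySem.Dict String Int → PySem.Dict String Int
  | 0, _, anc => anc
  | f + 1, parents, anc =>
    match PySem.List.pop? parents (-1) with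
    | none => anc
    | some (parent, rest) =>
        pvLoopA m freq f (rest ++ pvParents m parent) (anc.insert parent freq)

def get_all_ancestors (hpo_term : String) (child_to_parent_map : List (String × List String)) (freq : Int) : List (String × Int) :=
  (pvLoopA child_to_parent_map freq (pvFuel hpo_term child_to_parent_map)
      (pvParents child_to_parent_map hpo_term) PySem.Dict.empty).items

-- ===== PORT B =====
-- fuel for B's frame loop (each iteration either consumes a frame element or discards a frame)
def pvFuelF (hpo_term : String) (m : List (String × List String)) : Nat :=
  2 * pvFuel hpo_term m + 1

-- while frames: top = frames[0];
--   if not top: frames.pop(0); continue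
--   p = top.pop(0)
--   if p not in ancestors: ancestors[p] = freq; frames.insert(0, list(reversed(get(p, []))))
def pvLoopF (m : List (String × List String)) (freq : Int) :
    Nat → List (List String) → PySem.Dict String Int → PySem.Dict String Int
  | 0, _, anc => anc
  | _ + 1, [], anc => anc
  | f + 1, [] :: frames, anc => pvLoopF m freq f frames anc
  | f + 1, (p :: tp) :: frames, anc =>
      if anc.contains p then
        pvLoopF m freq f (tp :: frames) anc
      else
        pvLoopF m freq f ((pvParents m p).reverse :: tp :: frames) (anc.insert p freq)

def get_all_ancestors_alt (hpo_term : String) (child_to_parent_map : List (String × List String)) (freq : Int) : List (String × Int) :=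
  (pvLoopF child_to_parent_map freq (pvFuelF hpo_term child_to_parent_map)
      [(pvParents child_to_parent_map hpo_term).reverse] PySem.Dict.empty).items

-- ===== PRECONDITION & SPEC =====
-- pvDepth m f v = some (1 + length of the longest parent-chain from v), none if no bound < f exists.
def pvDepthL0 (dep : String → Option Nat) : List String → Option Nat
  | [] => some 0
  | q :: qs =>
    match dep q, pvDepthL0 dep qs with
    | some a, some b => some (max a b)
    | _, _ => none

def pvDepth (m : List (String × List String)) : Nat → String → Option Nat
  | 0, _ => none
  | f + 1, v => (pvDepthL0 (fun q => pvDepth m f q) (pvParents m v)).map (· + 1)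

-- Python A terminates exactly when no cycle of the parent relation is reachable from hpo_term;
-- Pre_ states this as: every parent-chain from hpo_term has finite depth (any acyclic input
-- qualifies, since a chain without repetitions is shorter than pvN + 2). On excluded inputs A loops forever.
def Pre_get_all_ancestors (hpo_term : String) (child_to_parent_map : List (String × List String)) (freq : Int) : Prop :=
  ∀ v ∈ pvParents child_to_parent_map hpo_term,
    (pvDepth child_to_parent_map (pvN hpo_term child_to_parent_map + 1) v).isSome = true

instance (hpo_term : String) (child_to_parent_map : List (String × List String)) (freq : Int) : Decidable (Pre_get_all_ancestors hpo_term child_to_parent_map freq) := by unfold Pre_get_all_ancestors; infer_instance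

def pvWitness_get_all_ancestors : String × (List (String × List String)) × Int :=
  ("HP:1", [("HP:1", ["HP:2", "HP:3"]), ("HP:2", ["HP:3"]), ("HP:3", [])], 7)

def Spec_get_all_ancestors (hpo_term : String) (child_to_parent_map : List (String × List String)) (freq : Int) (out : List (String × Int)) : Prop := out = get_all_ancestors_alt hpo_term child_to_parent_map freq
instance (hpo_term : String) (child_to_parent_map : List (String × List String)) (freq : Int) (out : List (String × Int)) : Decidable (Spec_get_all_ancestors hpo_term child_to_parent_map freq out) := by unfold Spec_get_all_ancestors; infer_instance

-- ===== CLAIM (what is proved, stated in full; the proofs are below) =====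
def Claim_equal_get_all_ancestors : Prop := ∀ (hpo_term : String) (child_to_parent_map : List (String × List String)) (freq : Int), Dom_get_all_ancestors hpo_term child_to_parent_map freq → Pre_get_all_ancestors hpo_term child_to_parent_map freq → Spec_get_all_ancestors hpo_term child_to_parent_map freq (get_all_ancestors hpo_term child_to_parent_map freq)

-- ===== LEMMAS AND PROOFS =====
def pvDepthL (m : List (String × List String)) (f : Nat) (l : List String) : Option Nat :=
  pvDepthL0 (fun q => pvDepth m f q) l

-- proof-only middle form: a flat stack (head = next to process) with a visited set; A's loop
-- (via the reversal bridge pv_bridgeA) and B's frame loop are each related to this one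
def pvLA (m : List (String × List String)) (freq : Int) :
    Nat → List String → PySem.Dict String Int → PySem.Dict String Int
  | 0, _, anc => anc
  | _ + 1, [], anc => anc
  | f + 1, p :: s, anc => pvLA m freq f ((pvParents m p).reverse ++ s) (anc.insert p freq)

def pvLB (m : List (String × List String)) (freq : Int) :
    Nat → List String → PySem.Dict String Int → PySem.Set String → PySem.Dict String Int
  | 0, _, anc, _ => anc
  | _ + 1, [], anc, _ => anc
  | f + 1, p :: s, anc, visited =>
    if PySem.Set.contains visited p then pvLB m freq f s anc visited
    else pvLB m freq f ((pvParents m p).reverse ++ s) (anc.insert p freq) (PySem.Set.add visited p)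

-- reachability along the parent relation
inductive pvReach (m : List (String × List String)) : String → String → Prop
  | refl (v : String) : pvReach m v v
  | step {v q w : String} : q ∈ pvParents m v → pvReach m q w → pvReach m v w

-- rank (depth value) and termination measure
def pvRank (m : List (String × List String)) (F : Nat) (v : String) : Nat :=
  (pvDepth m F v).getD 0

def pvW (m : List (String × List String)) (F C : Nat) (v : String) : Nat :=
  C ^ pvRank m F v

def pvM (m : List (String × List String)) (F C : Nat) (s : List String) : Nat :=
  (s.map (pvW m F C)).sum

-- the run invariant: stack elements have finite depth; all stored values are freq; keys are
-- distinct; and for any stack split s1 ++ x :: s2, anything reachable from a visited node that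
-- is reachable from x is either already visited or reachable from an element ABOVE x (in s1)
def pvInv (m : List (String × List String)) (freq : Int) (F : Nat)
    (s : List String) (anc : PySem.Dict String Int) : Prop :=
  (∀ v ∈ s, (pvDepth m F v).isSome = true) ∧
  (∀ p ∈ anc.items, p.2 = freq) ∧
  anc.keys.Nodup ∧
  (∀ (s1 : List String) (x : String) (s2 : List String), s = s1 ++ x :: s2 →
     ∀ u w, pvReach m x u → anc.contains u = true → pvReach m u w →
       (anc.contains w = true ∨ ∃ y ∈ s1, pvReach m y w))

-- ---------- bridge: A's literal port equals its fold-order twin ----------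

theorem pvLA_nil (m : List (String × List String)) (freq : Int) (f : Nat)
    (anc : PySem.Dict String Int) : pvLA m freq f [] anc = anc := by
  cases f <;> rfl

theorem pvLB_nil (m : List (String × List String)) (freq : Int) (f : Nat)
    (anc : PySem.Dict String Int) (vis : PySem.Set String) : pvLB m freq f [] anc vis = anc := by
  cases f <;> rfl

theorem pv_bridgeA (m : List (String × List String)) (freq : Int) :
    ∀ (f : Nat) (xs : List String) (anc : PySem.Dict String Int),
      pvLoopA m freq f xs anc = pvLA m freq f xs.reverse anc := by
  intro f
  induction f with
  | zero => intro xs anc; rfl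
  | succ f ih =>
    intro xs anc
    cases hxs : xs.reverse with
    | nil =>
      have hx : xs = [] := by simpa using congrArg List.reverse hxs
      subst hx
      simp [pvLoopA, pvLA, PySem.List.pop?]
    | cons p s =>
      have hx : xs = s.reverse ++ [p] := by
        have h2 := congrArg List.reverse hxs
        simpa using h2
      subst hx
      rw [pvLoopA, PySem.List.pop?_last]
      show pvLoopA m freq f (s.reverse ++ pvParents m p) (anc.insert p freq) = _
      rw [ih]
      rw [show pvLA m freq (f+1) (p :: s) anc
            = pvLA m freq f ((pvParents m p).reverse ++ s) (anc.insert p freq) from rfl]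
      simp [List.reverse_append]

-- ---------- depth lemmas ----------

theorem pvDepth_zero (m : List (String × List String)) (v : String) :
    pvDepth m 0 v = none := rfl

theorem pvDepth_succ (m : List (String × List String)) (f : Nat) (v : String) :
    pvDepth m (f + 1) v = (pvDepthL m f (pvParents m v)).map (· + 1) := rfl

theorem pvDepthL_nil (m : List (String × List String)) (f : Nat) :
    pvDepthL m f [] = some 0 := rfl

theorem pvDepthL_cons (m : List (String × List String)) (f : Nat) (q : String) (qs : List String) :
    pvDepthL m f (q :: qs) =
      match pvDepth m f q, pvDepthL m f qs with
      | some a, some b => some (max a b)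
      | _, _ => none := rfl

theorem pv_depth_mono (m : List (String × List String)) :
    ∀ f : Nat,
      (∀ (v : String) (k f' : Nat), f ≤ f' → pvDepth m f v = some k → pvDepth m f' v = some k) ∧
      (∀ (l : List String) (k f' : Nat), f ≤ f' → pvDepthL m f l = some k → pvDepthL m f' l = some k) := by
  intro f
  induction f with
  | zero =>
    constructor
    · intro v k f' _ h; simp [pvDepth_zero] at h
    · intro l k f' hf h
      cases l with
      | nil =>
        simp [pvDepthL_nil] at h ⊢
        omega
      | cons q qs =>
        rw [pvDepthL_cons] at h
        simp [pvDepth_zero] at h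
  | succ f ih =>
    have hd : ∀ (v : String) (k f' : Nat), f + 1 ≤ f' → pvDepth m (f+1) v = some k → pvDepth m f' v = some k := by
      intro v k f' hf h
      obtain ⟨f'', rfl⟩ : ∃ f'', f' = f'' + 1 := ⟨f' - 1, by omega⟩
      simp only [pvDepth_succ, Option.map_eq_some_iff] at h ⊢
      obtain ⟨b, hb, rfl⟩ := h
      exact ⟨b, ih.2 _ _ _ (by omega) hb, rfl⟩
    refine ⟨hd, ?_⟩
    intro l
    induction l with
    | nil =>
      intro k f' _ h
      simp [pvDepthL_nil] at h ⊢
      omega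
    | cons q qs ihl =>
      intro k f' hf h
      obtain ⟨f'', rfl⟩ : ∃ f'', f' = f'' + 1 := ⟨f' - 1, by omega⟩
      rw [pvDepthL_cons] at h
      cases hq : pvDepth m (f+1) q with
      | none => rw [hq] at h; simp at h
      | some a =>
        rw [hq] at h
        cases hqs : pvDepthL m (f+1) qs with
        | none => rw [hqs] at h; simp at h
        | some b =>
          rw [hqs] at h
          simp at h
          rw [pvDepthL_cons, hd q a _ (by omega) hq, ihl b _ (by omega) hqs]
          simpa using h

theorem pv_depth_le (m : List (String × List String)) :
    ∀ f : Nat,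
      (∀ (v : String) (k : Nat), pvDepth m f v = some k → k ≤ f) ∧
      (∀ (l : List String) (k : Nat), pvDepthL m f l = some k → k ≤ f) := by
  intro f
  induction f with
  | zero =>
    constructor
    · intro v k h; simp [pvDepth_zero] at h
    · intro l k h
      cases l with
      | nil => simp [pvDepthL_nil] at h; omega
      | cons q qs =>
        rw [pvDepthL_cons] at h
        simp [pvDepth_zero] at h
  | succ f ih =>
    have hd : ∀ (v : String) (k : Nat), pvDepth m (f+1) v = some k → k ≤ f + 1 := by
      intro v k h
      simp only [pvDepth_succ, Option.map_eq_some_iff] at h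
      obtain ⟨b, hb, rfl⟩ := h
      have := ih.2 _ _ hb; omega
    refine ⟨hd, ?_⟩
    intro l
    induction l with
    | nil => intro k h; simp [pvDepthL_nil] at h; omega
    | cons q qs ihl =>
      intro k h
      rw [pvDepthL_cons] at h
      cases hq : pvDepth m (f+1) q with
      | none => rw [hq] at h; simp at h
      | some a =>
        rw [hq] at h
        cases hqs : pvDepthL m (f+1) qs with
        | none => rw [hqs] at h; simp at h
        | some b =>
          rw [hqs] at h; simp at h
          have h1 := hd q a hq
          have h2 := ihl b hqs
          omega

theorem pv_depthL_elem (m : List (String × List String)) (f : Nat) :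
    ∀ (l : List String) (b : Nat), pvDepthL m f l = some b →
      ∀ q ∈ l, ∃ j, pvDepth m f q = some j ∧ j ≤ b := by
  intro l
  induction l with
  | nil => intro b _ q hq; simp at hq
  | cons x xs ihl =>
    intro b h q hq
    rw [pvDepthL_cons] at h
    cases hx : pvDepth m f x with
    | none => rw [hx] at h; simp at h
    | some a =>
      rw [hx] at h
      cases hxs : pvDepthL m f xs with
      | none => rw [hxs] at h; simp at h
      | some c =>
        rw [hxs] at h; simp at h
        rcases List.mem_cons.1 hq with rfl | hq'
        · exact ⟨a, hx, by omega⟩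
        · obtain ⟨j, hj, hjb⟩ := ihl c hxs q hq'
          exact ⟨j, hj, by omega⟩

-- parent decrease at the same fuel
theorem pv_depth_parent (m : List (String × List String)) (f : Nat) (v q : String) (k : Nat)
    (h : pvDepth m f v = some k) (hq : q ∈ pvParents m v) :
    ∃ j, pvDepth m f q = some j ∧ j < k := by
  obtain ⟨f', rfl⟩ : ∃ f', f = f' + 1 := by
    cases f with
    | zero => simp [pvDepth_zero] at h
    | succ f' => exact ⟨f', rfl⟩
  simp only [pvDepth_succ, Option.map_eq_some_iff] at h
  obtain ⟨b, hb, rfl⟩ := h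
  obtain ⟨j, hj, hjb⟩ := pv_depthL_elem m f' _ b hb q hq
  exact ⟨j, (pv_depth_mono m f').1 q j (f' + 1) (by omega) hj, by omega⟩

theorem pv_depth_parent_isSome (m : List (String × List String)) (F : Nat) (v q : String)
    (h : (pvDepth m F v).isSome = true) (hq : q ∈ pvParents m v) :
    (pvDepth m F q).isSome = true := by
  obtain ⟨k, hk⟩ := Option.isSome_iff_exists.1 h
  obtain ⟨j, hj, _⟩ := pv_depth_parent m F v q k hk hq
  simp [hj]

theorem pv_rank_parent_lt (m : List (String × List String)) (F : Nat) (v q : String)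
    (h : (pvDepth m F v).isSome = true) (hq : q ∈ pvParents m v) :
    pvRank m F q < pvRank m F v := by
  obtain ⟨k, hk⟩ := Option.isSome_iff_exists.1 h
  obtain ⟨j, hj, hjk⟩ := pv_depth_parent m F v q k hk hq
  simp [pvRank, hk, hj]; omega

-- ---------- reachability lemmas ----------

theorem pvReach_inv (m : List (String × List String)) {v w : String} (h : pvReach m v w) :
    w = v ∨ ∃ q ∈ pvParents m v, pvReach m q w := by
  cases h with
  | refl => exact Or.inl rfl
  | step hq hr => exact Or.inr ⟨_, hq, hr⟩

theorem pv_reach_rank (m : List (String × List String)) (F : Nat) {a b : String}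
    (h : pvReach m a b) :
    (pvDepth m F a).isSome = true →
    (pvDepth m F b).isSome = true ∧ pvRank m F b ≤ pvRank m F a := by
  induction h with
  | refl v => intro ha; exact ⟨ha, le_refl _⟩
  | @step v q w hq _ ih =>
    intro ha
    have hqs := pv_depth_parent_isSome m F v q ha hq
    have hlt := pv_rank_parent_lt m F v q ha hq
    obtain ⟨h1, h2⟩ := ih hqs
    exact ⟨h1, by omega⟩

theorem pv_no_cycle (m : List (String × List String)) (F : Nat) {v q : String}
    (h : (pvDepth m F v).isSome = true) (hq : q ∈ pvParents m v) (hr : pvReach m q v) : False := by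
  have hqs := pv_depth_parent_isSome m F v q h hq
  have hlt := pv_rank_parent_lt m F v q h hq
  have := (pv_reach_rank m F hr hqs).2
  omega

-- ---------- measure lemmas ----------

theorem pvM_append (m : List (String × List String)) (F C : Nat) (s t : List String) :
    pvM m F C (s ++ t) = pvM m F C s + pvM m F C t := by
  simp [pvM]

theorem pvW_pos (m : List (String × List String)) (F C : Nat) (hC : 2 ≤ C) (v : String) :
    1 ≤ pvW m F C v := Nat.one_le_pow _ _ (by omega)

theorem pvM_len_le (m : List (String × List String)) (F C : Nat) (hC : 2 ≤ C) (s : List String) :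
    s.length ≤ pvM m F C s := by
  induction s with
  | nil => simp [pvM]
  | cons v s ih =>
    have h1 := pvW_pos m F C hC v
    have h2 : pvM m F C (v :: s) = pvW m F C v + pvM m F C s := by simp [pvM]
    simp only [List.length_cons]
    omega

theorem pvM_eq_zero (m : List (String × List String)) (F C : Nat) (hC : 2 ≤ C) (s : List String)
    (h : pvM m F C s = 0) : s = [] := by
  cases s with
  | nil => rfl
  | cons v s =>
    have := pvW_pos m F C hC v
    simp only [pvM, List.map_cons, List.sum_cons] at h
    omega

-- the parents of a node weigh strictly less than the node itself
theorem pvM_parents_lt (m : List (String × List String)) (F C : Nat) (hC : 2 ≤ C) (v : String)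
    (hv : (pvDepth m F v).isSome = true) (hlen : (pvParents m v).length < C) :
    pvM m F C ((pvParents m v).reverse) < pvW m F C v := by
  cases hp : pvParents m v with
  | nil =>
    simp only [List.reverse_nil, pvM, List.map_nil, List.sum_nil]
    exact Nat.pow_pos (by omega)
  | cons a l =>
    set K := pvRank m F v with hK
    have hKpos : 1 ≤ K := by
      have := pv_rank_parent_lt m F v a hv (by rw [hp]; exact List.mem_cons_self ..)
      omega
    have hterm : ∀ x ∈ (a :: l).reverse.map (pvW m F C), x ≤ C ^ (K - 1) := by
      intro x hx
      obtain ⟨q, hq, rfl⟩ := List.mem_map.1 hx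
      have hq' : q ∈ pvParents m v := by rw [hp]; exact List.mem_reverse.1 hq
      have hlt := pv_rank_parent_lt m F v q hv hq'
      exact Nat.pow_le_pow_right (by omega) (by omega)
    have hsum := List.sum_le_card_nsmul _ _ hterm
    have hp2 : 0 < C ^ (K - 1) := Nat.pow_pos (by omega)
    rw [hp] at hlen
    calc pvM m F C ((a :: l).reverse)
        ≤ (a :: l).length * C ^ (K - 1) := by
          simpa [pvM, smul_eq_mul] using hsum
      _ < C * C ^ (K - 1) := (Nat.mul_lt_mul_right hp2).2 hlen
      _ = C ^ K := by
          rw [← pow_succ']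
          congr 1
          omega

-- ---------- dict / set helper lemmas ----------

-- inserting an already-present key with the value every entry carries is a no-op
theorem pv_insert_id (anc : PySem.Dict String Int) (v : String) (freq : Int)
    (hfreq : ∀ p ∈ anc.items, p.2 = freq) (hc : anc.contains v = true) :
    anc.insert v freq = anc := by
  apply PySem.Dict.ext
  rw [PySem.Dict.items_insert_of_contains anc freq hc]
  have : ∀ p ∈ anc.items, (if p.1 == v then (v, freq) else p) = p := by
    intro p hp
    by_cases h : p.1 == v
    · rw [if_pos h]
      have h1 : p.1 = v := by simpa using h
      have h2 : p.2 = freq := hfreq p hp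
      cases p; simp_all
    · rw [if_neg h]
  rw [List.map_congr_left this]
  simp

theorem pv_set_contains_keys (anc : PySem.Dict String Int) (v : String) :
    PySem.Set.contains anc.keys v = anc.contains v := by
  by_cases hm : v ∈ anc.keys
  · rw [(PySem.Set.contains_iff anc.keys v).2 hm, (PySem.Dict.contains_iff_mem_keys anc v).2 hm]
  · have h1 : PySem.Set.contains anc.keys v ≠ true :=
      fun hx => hm ((PySem.Set.contains_iff anc.keys v).1 hx)
    have h2 : anc.contains v ≠ true :=
      fun hx => hm ((PySem.Dict.contains_iff_mem_keys anc v).1 hx)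
    simp only [ne_eq, Bool.not_eq_true] at h1 h2
    rw [h1, h2]

-- ---------- middle-form bookkeeping lemmas ----------

-- skipping a fully-visited prefix costs exactly its length in fuel
theorem pvLB_skip (m : List (String × List String)) (freq : Int) :
    ∀ (P : List String) (f : Nat) (s : List String) (anc : PySem.Dict String Int)
      (vis : PySem.Set String), (∀ p ∈ P, PySem.Set.contains vis p = true) →
      pvLB m freq f (P ++ s) anc vis = pvLB m freq (f - P.length) s anc vis := by
  intro P
  induction P with
  | nil => intro f s anc vis _; simp
  | cons p P ih =>
    intro f s anc vis hvis
    cases f with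
    | zero => rw [Nat.zero_sub]; rfl
    | succ f =>
      have hp : PySem.Set.contains vis p = true := hvis p (List.mem_cons_self ..)
      show pvLB m freq (f+1) (p :: (P ++ s)) anc vis = _
      rw [pvLB, if_pos hp, ih f s anc vis (fun q hq => hvis q (List.mem_cons_of_mem _ hq))]
      congr 1
      simp [Nat.succ_sub_succ]

-- with sufficient fuel the middle-form result does not depend on the exact fuel
theorem pvLB_fuel (m : List (String × List String)) (freq : Int) (F C : Nat) (hC : 2 ≤ C)
    (hlen : ∀ x : String, (pvParents m x).length < C) :
    ∀ (f g : Nat) (s : List String) (anc : PySem.Dict String Int) (vis : PySem.Set String),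
      (∀ v ∈ s, (pvDepth m F v).isSome = true) →
      pvM m F C s ≤ f → pvM m F C s ≤ g →
      pvLB m freq f s anc vis = pvLB m freq g s anc vis := by
  intro f
  induction f with
  | zero =>
    intro g s anc vis _ hf _
    have : s = [] := pvM_eq_zero m F C hC s (by omega)
    subst this
    simp [pvLB_nil]
  | succ f ih =>
    intro g s anc vis hrank hf hg
    cases s with
    | nil => simp [pvLB_nil]
    | cons v s =>
      have hWv := pvW_pos m F C hC v
      have hMv : pvM m F C (v :: s) = pvW m F C v + pvM m F C s := by
        simp [pvM]
      obtain ⟨g', rfl⟩ : ∃ g', g = g' + 1 := ⟨g - 1, by omega⟩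
      rw [pvLB, pvLB]
      by_cases hc : PySem.Set.contains vis v = true
      · rw [if_pos hc, if_pos hc]
        exact ih g' s anc vis (fun x hx => hrank x (by simp [hx])) (by omega) (by omega)
      · rw [if_neg hc, if_neg hc]
        have hv : (pvDepth m F v).isSome = true := hrank v (by simp)
        have hMP := pvM_parents_lt m F C hC v hv (hlen v)
        have hMnew : pvM m F C ((pvParents m v).reverse ++ s) < pvM m F C (v :: s) := by
          rw [pvM_append]; omega
        apply ih g' _ _ _
        · intro x hx
          rcases List.mem_append.1 hx with hx | hx
          · exact pv_depth_parent_isSome m F v x hv (List.mem_reverse.1 hx)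
          · exact hrank x (by simp [hx])
        · omega
        · omega

-- ---------- parents are bounded by the total map size ----------

theorem pv_parents_len (m : List (String × List String)) (x : String) :
    (pvParents m x).length ≤ (m.map (fun kv => kv.2.length)).sum := by
  induction m with
  | nil =>
    simp [show pvParents [] x = [] from rfl]
  | cons kv rest ih =>
    obtain ⟨k0, v0⟩ := kv
    rw [pvParents, PySem.Dict.getD_eq_get?_getD, PySem.Dict.get?_mk_cons]
    by_cases h : (k0 == x) = true
    · rw [if_pos h]
      simp
    · rw [if_neg h]
      rw [pvParents, PySem.Dict.getD_eq_get?_getD] at ih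
      simp only [List.map_cons, List.sum_cons]
      omega

-- ---------- splitting a concatenation around a distinguished element ----------

theorem pv_split {α : Type} (P : List α) :
    ∀ (s s1 s2 : List α) (x : α), P ++ s = s1 ++ x :: s2 →
      (∃ s2', P = s1 ++ x :: s2' ∧ s2 = s2' ++ s) ∨
      (∃ s1', s1 = P ++ s1' ∧ s = s1' ++ x :: s2) := by
  induction P with
  | nil =>
    intro s s1 s2 x h
    right
    exact ⟨s1, by simp, by simpa using h⟩
  | cons p P ih =>
    intro s s1 s2 x h
    cases s1 with
    | nil =>
      simp only [List.nil_append] at h ⊢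
      obtain ⟨rfl, h2⟩ := List.cons_eq_cons.1 h
      left
      exact ⟨P, rfl, h2.symm⟩
    | cons a s1' =>
      simp only [List.cons_append] at h
      obtain ⟨rfl, h2⟩ := List.cons_eq_cons.1 h
      rcases ih s s1' s2 x h2 with ⟨s2', hP, hs2⟩ | ⟨s1'', hs1, hs⟩
      · left
        exact ⟨s2', by rw [hP]; rfl, hs2⟩
      · right
        exact ⟨s1'', by rw [hs1]; rfl, hs⟩

-- ---------- invariant preservation ----------

-- the head fact: everything reachable from a visited node reachable from the head is visited
theorem pv_head_fact (m : List (String × List String)) (freq : Int) (F : Nat)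
    (v : String) (s : List String) (anc : PySem.Dict String Int)
    (hpos : ∀ (s1 : List String) (x : String) (s2 : List String), v :: s = s1 ++ x :: s2 →
       ∀ u w, pvReach m x u → anc.contains u = true → pvReach m u w →
         (anc.contains w = true ∨ ∃ y ∈ s1, pvReach m y w)) :
    ∀ u w, pvReach m v u → anc.contains u = true → pvReach m u w → anc.contains w = true := by
  intro u w h1 h2 h3
  rcases hpos [] v s rfl u w h1 h2 h3 with h | ⟨y, hy, _⟩
  · exact h
  · simp at hy

theorem pvInv_junk (m : List (String × List String)) (freq : Int) (F : Nat)
    {v : String} {s : List String} {anc : PySem.Dict String Int}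
    (h : pvInv m freq F (v :: s) anc) (hv : anc.contains v = true) :
    pvInv m freq F ((pvParents m v).reverse ++ s) anc := by
  obtain ⟨hrank, hfreq, hnodup, hpos⟩ := h
  have hvd : (pvDepth m F v).isSome = true := hrank v (by simp)
  have Hv := pv_head_fact m freq F v s anc hpos
  refine ⟨?_, hfreq, hnodup, ?_⟩
  · intro x hx
    rcases List.mem_append.1 hx with hx | hx
    · exact pv_depth_parent_isSome m F v x hvd (List.mem_reverse.1 hx)
    · exact hrank x (by simp [hx])
  · intro s1 x s2 hsplit u w hxu hcu huw
    rcases pv_split _ _ _ _ _ hsplit with ⟨s2', hP, _⟩ | ⟨s1', hs1, hs⟩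
    · -- x is one of v's parents
      have hxp : x ∈ pvParents m v := by
        have : x ∈ (pvParents m v).reverse := by rw [hP]; simp
        exact List.mem_reverse.1 this
      have hvu : pvReach m v u := pvReach.step hxp hxu
      exact Or.inl (Hv u w hvu hcu huw)
    · -- x was already in s
      have hold := hpos (v :: s1') x s2 (by rw [hs]; rfl) u w hxu hcu huw
      rcases hold with hw | ⟨y, hy, hyw⟩
      · exact Or.inl hw
      · rcases List.mem_cons.1 hy with rfl | hy'
        · exact Or.inl (Hv y w (pvReach.refl y) hv hyw)
        · exact Or.inr ⟨y, by rw [hs1]; exact List.mem_append_right _ hy', hyw⟩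

theorem pvInv_fresh (m : List (String × List String)) (freq : Int) (F : Nat)
    {v : String} {s : List String} {anc : PySem.Dict String Int}
    (h : pvInv m freq F (v :: s) anc) (hv : anc.contains v = false) :
    pvInv m freq F ((pvParents m v).reverse ++ s) (anc.insert v freq) := by
  obtain ⟨hrank, hfreq, hnodup, hpos⟩ := h
  have hvd : (pvDepth m F v).isSome = true := hrank v (by simp)
  have Hv := pv_head_fact m freq F v s anc hpos
  have hcont : ∀ z : String, (anc.insert v freq).contains z = true ↔ (z = v ∨ anc.contains z = true) := by
    intro z
    rw [PySem.Dict.contains_insert]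
    simp
  refine ⟨?_, ?_, PySem.Dict.nodup_keys_insert _ _ _ hnodup, ?_⟩
  · intro x hx
    rcases List.mem_append.1 hx with hx | hx
    · exact pv_depth_parent_isSome m F v x hvd (List.mem_reverse.1 hx)
    · exact hrank x (by simp [hx])
  · intro p hp
    rw [PySem.Dict.items_insert_of_not_contains anc freq hv] at hp
    rcases List.mem_append.1 hp with hp | hp
    · exact hfreq p hp
    · simp at hp; rw [hp]
  · intro s1 x s2 hsplit u w hxu hcu huw
    have hmemP : ∀ q ∈ pvParents m v, q ∈ (pvParents m v).reverse := fun q hq => List.mem_reverse.2 hq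
    rcases pv_split _ _ _ _ _ hsplit with ⟨s2', hP, _⟩ | ⟨s1', hs1, hs⟩
    · -- x is one of v's parents
      have hxp : x ∈ pvParents m v := by
        have : x ∈ (pvParents m v).reverse := by rw [hP]; simp
        exact List.mem_reverse.1 this
      rcases (hcont u).1 hcu with rfl | hcu'
      · exact (pv_no_cycle m F hvd hxp hxu).elim
      · have hvu : pvReach m v u := pvReach.step hxp hxu
        exact Or.inl ((hcont w).2 (Or.inr (Hv u w hvu hcu' huw)))
    · -- x was already in s
      have hvw_case : ∀ w', pvReach m v w' →
          ((anc.insert v freq).contains w' = true ∨ ∃ y ∈ s1, pvReach m y w') := by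
        intro w' hvw
        rcases pvReach_inv m hvw with rfl | ⟨q, hq, hqw⟩
        · exact Or.inl ((hcont w').2 (Or.inl rfl))
        · exact Or.inr ⟨q, by rw [hs1]; exact List.mem_append_left _ (hmemP q hq), hqw⟩
      rcases (hcont u).1 hcu with rfl | hcu'
      · exact hvw_case w huw
      · have hold := hpos (v :: s1') x s2 (by rw [hs]; rfl) u w hxu hcu' huw
        rcases hold with hw | ⟨y, hy, hyw⟩
        · exact Or.inl ((hcont w).2 (Or.inr hw))
        · rcases List.mem_cons.1 hy with rfl | hy'
          · exact hvw_case w hyw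
          · exact Or.inr ⟨y, by rw [hs1]; exact List.mem_append_right _ hy', hyw⟩

-- ---------- A's loop equals the middle form under the invariant ----------

theorem pv_eq_main (m : List (String × List String)) (freq : Int) (F C : Nat) (hC : 2 ≤ C)
    (hlen : ∀ x : String, (pvParents m x).length < C) :
    ∀ (f : Nat) (s : List String) (anc : PySem.Dict String Int),
      pvInv m freq F s anc → pvM m F C s ≤ f →
      pvLA m freq f s anc = pvLB m freq f s anc anc.keys := by
  intro f
  induction f with
  | zero =>
    intro s anc _ hf
    have : s = [] := pvM_eq_zero m F C hC s (by omega)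
    subst this
    simp [pvLA_nil, pvLB_nil]
  | succ f ih =>
    intro s anc hinv hf
    cases s with
    | nil => simp [pvLA_nil, pvLB_nil]
    | cons v s =>
      obtain ⟨hrank, hfreq, hnodup, hpos⟩ := hinv
      have hvd : (pvDepth m F v).isSome = true := hrank v (by simp)
      have hMP := pvM_parents_lt m F C hC v hvd (hlen v)
      have hM : pvM m F C (v :: s) = pvW m F C v + pvM m F C s := by simp [pvM]
      have hMPl := pvM_len_le m F C hC ((pvParents m v).reverse)
      have hMapp : pvM m F C ((pvParents m v).reverse ++ s)
          = pvM m F C ((pvParents m v).reverse) + pvM m F C s := pvM_append m F C _ _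
      by_cases hc : anc.contains v = true
      · -- v already visited: A re-expands it (a no-op overall), the middle form skips it
        have Hv := pv_head_fact m freq F v s anc hpos
        have hvisc : PySem.Set.contains anc.keys v = true := by
          rw [pv_set_contains_keys]; exact hc
        rw [show pvLA m freq (f+1) (v :: s) anc
              = pvLA m freq f ((pvParents m v).reverse ++ s) (anc.insert v freq) from rfl]
        rw [pv_insert_id anc v freq hfreq hc]
        rw [show pvLB m freq (f+1) (v :: s) anc anc.keys
              = pvLB m freq f s anc anc.keys from by rw [pvLB, if_pos hvisc]]
        rw [ih _ _ (pvInv_junk m freq F ⟨hrank, hfreq, hnodup, hpos⟩ hc) (by omega)]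
        have hPvis : ∀ p ∈ (pvParents m v).reverse, PySem.Set.contains anc.keys p = true := by
          intro p hp
          rw [pv_set_contains_keys]
          exact Hv v p (pvReach.refl v) hc (pvReach.step (List.mem_reverse.1 hp) (pvReach.refl p))
        rw [pvLB_skip m freq _ f s anc anc.keys hPvis]
        exact pvLB_fuel m freq F C hC hlen _ f s anc anc.keys
          (fun x hx => hrank x (by simp [hx])) (by omega) (by omega)
      · -- v is fresh: both insert it and push its parents
        have hcf : anc.contains v = false := by simpa using hc
        have hvisc : ¬ PySem.Set.contains anc.keys v = true := by
          rw [pv_set_contains_keys, hcf]; simp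
        have hvnm : v ∉ anc.keys := by
          intro hmem
          exact hvisc (by rw [pv_set_contains_keys]; exact (PySem.Dict.contains_iff_mem_keys _ _).2 hmem)
        have hkeys : (anc.insert v freq).keys = PySem.Set.add anc.keys v := by
          rw [PySem.Dict.keys_insert_of_not_contains anc freq hcf, PySem.Set.add_of_not_mem hvnm]
        rw [show pvLA m freq (f+1) (v :: s) anc
              = pvLA m freq f ((pvParents m v).reverse ++ s) (anc.insert v freq) from rfl]
        rw [show pvLB m freq (f+1) (v :: s) anc anc.keys
              = pvLB m freq f ((pvParents m v).reverse ++ s) (anc.insert v freq)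
                  (PySem.Set.add anc.keys v) from by rw [pvLB, if_neg hvisc]]
        rw [← hkeys]
        exact ih _ _ (pvInv_fresh m freq F ⟨hrank, hfreq, hnodup, hpos⟩ hcf) (by omega)

-- ---------- B's frame loop equals the middle form ----------

-- frames flatten to the middle form's stack; each frame step either consumes one stack
-- element (weight ≥ 1 in pvM) or discards one frame, so 2·pvM + #frames bounds the fuel
theorem pv_frames_main (m : List (String × List String)) (freq : Int) (F C : Nat) (hC : 2 ≤ C)
    (hlen : ∀ x : String, (pvParents m x).length < C) :
    ∀ (f : Nat) (frames : List (List String)) (anc : PySem.Dict String Int),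
      (∀ v ∈ frames.flatten, (pvDepth m F v).isSome = true) →
      anc.keys.Nodup →
      2 * pvM m F C frames.flatten + frames.length ≤ f →
      ∀ g, pvM m F C frames.flatten ≤ g →
        pvLoopF m freq f frames anc = pvLB m freq g frames.flatten anc anc.keys := by
  intro f
  induction f with
  | zero =>
    intro frames anc _ _ hf g _
    have hfr : frames = [] := by
      cases frames with
      | nil => rfl
      | cons a l => simp at hf
    subst hfr
    simp [pvLoopF, pvLB_nil]
  | succ f ih =>
    intro frames anc hrank hnodup hf g hg
    cases frames with
    | nil => simp [pvLoopF, pvLB_nil]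
    | cons top rest =>
      cases top with
      | nil =>
        -- empty frame: discard it; the flattened stack is unchanged
        rw [show pvLoopF m freq (f+1) ([] :: rest) anc = pvLoopF m freq f rest anc from rfl]
        have hfl : (([] : List String) :: rest).flatten = rest.flatten := by simp
        rw [hfl] at hrank hf hg ⊢
        exact ih rest anc hrank hnodup (by simp only [List.length_cons] at hf; omega) g hg
      | cons p tp =>
        have hfl : ((p :: tp) :: rest).flatten = p :: (tp :: rest).flatten := by simp
        rw [hfl] at hrank hf hg ⊢
        have hWp := pvW_pos m F C hC p
        have hM : pvM m F C (p :: (tp :: rest).flatten)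
            = pvW m F C p + pvM m F C ((tp :: rest).flatten) := by simp [pvM]
        obtain ⟨g', rfl⟩ : ∃ g', g = g' + 1 := ⟨g - 1, by omega⟩
        have hrank' : ∀ v ∈ (tp :: rest).flatten, (pvDepth m F v).isSome = true :=
          fun v hv => hrank v (List.mem_cons_of_mem _ hv)
        by_cases hc : anc.contains p = true
        · -- p already collected: both skip it
          have hvisc : PySem.Set.contains anc.keys p = true := by
            rw [pv_set_contains_keys]; exact hc
          rw [show pvLoopF m freq (f+1) ((p :: tp) :: rest) anc
                = pvLoopF m freq f (tp :: rest) anc from by rw [pvLoopF, if_pos hc]]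
          rw [show pvLB m freq (g'+1) (p :: (tp :: rest).flatten) anc anc.keys
                = pvLB m freq g' ((tp :: rest).flatten) anc anc.keys from by
              rw [pvLB, if_pos hvisc]]
          have hf' : 2 * pvM m F C ((tp :: rest).flatten) + (tp :: rest).length ≤ f := by
            simp only [List.length_cons] at hf ⊢; omega
          by_cases hgM : pvM m F C ((tp :: rest).flatten) ≤ g'
          · exact ih (tp :: rest) anc hrank' hnodup hf' g' hgM
          · -- g' might be short by the skipped weight; renormalize with pvLB_fuel
            rw [pvLB_fuel m freq F C hC hlen g' (pvM m F C ((tp :: rest).flatten))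
                  ((tp :: rest).flatten) anc anc.keys hrank' (by omega) (le_refl _)]
            exact ih (tp :: rest) anc hrank' hnodup hf' _ (le_refl _)
        · -- p is fresh: both insert it and push its (reversed) parents
          have hcf : anc.contains p = false := by simpa using hc
          have hvisc : ¬ PySem.Set.contains anc.keys p = true := by
            rw [pv_set_contains_keys, hcf]; simp
          have hpnm : p ∉ anc.keys := fun hmem =>
            hvisc (by rw [pv_set_contains_keys]; exact (PySem.Dict.contains_iff_mem_keys _ _).2 hmem)
          have hkeys : (anc.insert p freq).keys = PySem.Set.add anc.keys p := by
            rw [PySem.Dict.keys_insert_of_not_contains anc freq hcf, PySem.Set.add_of_not_mem hpnm]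
          have hpd : (pvDepth m F p).isSome = true := hrank p (by simp)
          have hMP := pvM_parents_lt m F C hC p hpd (hlen p)
          rw [show pvLoopF m freq (f+1) ((p :: tp) :: rest) anc
                = pvLoopF m freq f ((pvParents m p).reverse :: tp :: rest) (anc.insert p freq)
              from by rw [pvLoopF, if_neg hc]]
          rw [show pvLB m freq (g'+1) (p :: (tp :: rest).flatten) anc anc.keys
                = pvLB m freq g' ((pvParents m p).reverse ++ (tp :: rest).flatten)
                    (anc.insert p freq) (PySem.Set.add anc.keys p)
              from by rw [pvLB, if_neg hvisc]]
          rw [← hkeys]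
          have hfl2 : ((pvParents m p).reverse :: tp :: rest).flatten
              = (pvParents m p).reverse ++ (tp :: rest).flatten := by simp
          have hrank2 : ∀ v ∈ ((pvParents m p).reverse :: tp :: rest).flatten,
              (pvDepth m F v).isSome = true := by
            intro v hv
            rw [hfl2] at hv
            rcases List.mem_append.1 hv with hv | hv
            · exact pv_depth_parent_isSome m F p v hpd (List.mem_reverse.1 hv)
            · exact hrank' v hv
          have hM2 : pvM m F C ((pvParents m p).reverse ++ (tp :: rest).flatten)
              = pvM m F C ((pvParents m p).reverse) + pvM m F C ((tp :: rest).flatten) :=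
            pvM_append m F C _ _
          have := ih ((pvParents m p).reverse :: tp :: rest) (anc.insert p freq)
            hrank2 (PySem.Dict.nodup_keys_insert _ _ _ hnodup)
            (by rw [hfl2, hM2]; simp only [List.length_cons] at hf ⊢; omega)
            g' (by rw [hfl2, hM2]; omega)
          rw [hfl2] at this
          exact this

-- ===== VERDICT (by name: the statement is the Claim_ definition above) =====
theorem get_all_ancestors_spec : Claim_equal_get_all_ancestors := by
  unfold Claim_equal_get_all_ancestors
  intro t m freq _ hpre
  unfold Spec_get_all_ancestors get_all_ancestors get_all_ancestors_alt
  rw [pv_bridgeA]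
  congr 1
  have hsum_le : (m.map (fun kv => kv.2.length)).sum ≤ pvN t m := by
    unfold pvN; omega
  have hlen : ∀ x : String, (pvParents m x).length < pvN t m + 2 := by
    intro x
    have := pv_parents_len m x
    omega
  set N := pvN t m with hN
  have hM0 : pvM m (N+1) (N+2) ((pvParents m t).reverse) ≤ pvFuel t m := by
    have hterm : ∀ x ∈ (pvParents m t).reverse.map (pvW m (N+1) (N+2)), x ≤ (N+2) ^ (N+1) := by
      intro x hx
      obtain ⟨q, hq, rfl⟩ := List.mem_map.1 hx
      have hqs : (pvDepth m (N+1) q).isSome = true := hpre q (List.mem_reverse.1 hq)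
      obtain ⟨k, hk⟩ := Option.isSome_iff_exists.1 hqs
      have hkle : k ≤ N + 1 := (pv_depth_le m (N+1)).1 q k hk
      have : pvRank m (N+1) q ≤ N + 1 := by rw [pvRank, hk]; simpa using hkle
      exact Nat.pow_le_pow_right (by omega) this
    have hsum := List.sum_le_card_nsmul _ _ hterm
    have hlen0 : (pvParents m t).length ≤ N := by
      rw [hN]; unfold pvN; omega
    have hfuel : pvFuel t m = (N+2) ^ (N+2) := rfl
    rw [hfuel]
    calc pvM m (N+1) (N+2) ((pvParents m t).reverse)
        ≤ (pvParents m t).length * (N+2) ^ (N+1) := by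
          simpa [pvM, smul_eq_mul] using hsum
      _ ≤ (N+2) * (N+2) ^ (N+1) := Nat.mul_le_mul_right _ (by omega)
      _ = (N+2) ^ (N+2) := by rw [← pow_succ']
  have hrank0 : ∀ v ∈ (pvParents m t).reverse, (pvDepth m (N+1) v).isSome = true :=
    fun v hv => hpre v (List.mem_reverse.1 hv)
  have hkeys0 : (PySem.Dict.empty : PySem.Dict String Int).keys = PySem.Set.empty := rfl
  -- A side: literal loop (already in middle-stack order) equals pvLB
  have hA : pvLA m freq (pvFuel t m) ((pvParents m t).reverse) PySem.Dict.empty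
      = pvLB m freq (pvFuel t m) ((pvParents m t).reverse) PySem.Dict.empty
          (PySem.Dict.empty : PySem.Dict String Int).keys := by
    apply pv_eq_main m freq (N+1) (N+2) (by omega) hlen
    · refine ⟨?_, ?_, ?_, ?_⟩
      · exact hrank0
      · intro p hp
        rw [show (PySem.Dict.empty : PySem.Dict String Int).items = [] from rfl] at hp
        simp at hp
      · exact PySem.Dict.nodup_keys_empty
      · intro s1 x s2 _ u w _ hcu _
        rw [PySem.Dict.contains_empty] at hcu
        exact absurd hcu (by simp)
    · exact hM0
  -- B side: frame loop equals pvLB with the same fuel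
  have hB : pvLoopF m freq (pvFuelF t m) [(pvParents m t).reverse] PySem.Dict.empty
      = pvLB m freq (pvFuel t m) ((pvParents m t).reverse) PySem.Dict.empty
          (PySem.Dict.empty : PySem.Dict String Int).keys := by
    have hfl : ([(pvParents m t).reverse] : List (List String)).flatten
        = (pvParents m t).reverse := by simp
    have := pv_frames_main m freq (N+1) (N+2) (by omega) hlen (pvFuelF t m)
      [(pvParents m t).reverse] PySem.Dict.empty
      (by rw [hfl]; exact hrank0) PySem.Dict.nodup_keys_empty
      (by rw [hfl]; unfold pvFuelF; simp only [List.length_cons, List.length_nil]; omega)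
      (pvFuel t m) (by rw [hfl]; exact hM0)
    rw [hfl] at this
    exact this
  rw [hA, hB]
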